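-- pv_equiv track=rewrite | github.com/Probely/API_Scripts | utils/navigation_converter.py | getSeleniumCssAndXPath
-- ===== SOURCE A (Python) =====
-- def getSeleniumCssAndXPath(targets, target):
--     css = None
--     xpath = None
--     for item in targets:
--         if item[1] == 'css:finder':
--             css = item[0].replace('css=', '')
--         if item[1] == 'xpath:position':
--             xpath = item[0].replace('xpath=', '')
--
--     if css is None and target:
--         if target.startswith('name='):
--             css = '[{}]'.format(target)
--         elif target.startswith('id='):
--             css = '[{}]'.format(target)
--     return (css, xpath)
-- ===== SOURCE B (Python) =====
-- def getSeleniumCssAndXPath(targets, target):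
--     css = None
--     xpath = None
--     # scan from the end: the first match seen in reverse is the last match in order
--     for item in reversed(targets):
--         if css is None and item[1] == 'css:finder':
--             css = item[0].replace('css=', '')
--         if xpath is None and item[1] == 'xpath:position':
--             xpath = item[0].replace('xpath=', '')
--         if css is not None and xpath is not None:
--             break
--     if css is None and target:
--         if target.startswith('name=') or target.startswith('id='):
--             css = '[{}]'.format(target)
--     return (css, xpath)
-- ===== Notes on version B (the rewrite author's own statement) =====
-- stated objective: alternative
-- what changed: B scans the list in reverse taking the first css:finder / xpath:position match (with early break once both are found) instead of A's full forward pass where the last match overwrites; the fallback keeps None semantics identically.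
import Mathlib
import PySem

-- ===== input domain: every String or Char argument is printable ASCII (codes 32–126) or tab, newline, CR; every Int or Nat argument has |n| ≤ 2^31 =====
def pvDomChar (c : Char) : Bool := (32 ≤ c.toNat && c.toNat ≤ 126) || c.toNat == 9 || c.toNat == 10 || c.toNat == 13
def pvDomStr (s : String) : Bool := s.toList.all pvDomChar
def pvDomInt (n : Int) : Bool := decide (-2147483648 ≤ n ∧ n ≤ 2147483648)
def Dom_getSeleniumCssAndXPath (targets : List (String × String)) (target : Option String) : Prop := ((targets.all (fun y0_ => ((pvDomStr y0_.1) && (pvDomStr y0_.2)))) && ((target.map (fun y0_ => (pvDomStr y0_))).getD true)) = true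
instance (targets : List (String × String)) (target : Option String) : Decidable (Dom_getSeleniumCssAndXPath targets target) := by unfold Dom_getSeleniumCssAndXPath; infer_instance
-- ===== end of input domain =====

-- B replaces A's full forward pass (last match overwrites) by a reverse scan taking the
-- first match with an early break once both selectors are found; return value only, same result.

-- ===== PORT A =====
-- the forward loop body: overwrite css / xpath on each matching item
def pvStepA (st : Option String × Option String) (item : String × String) :
    Option String × Option String :=
  let st := if item.2 = "css:finder" then (some (PySem.Str.replace item.1 "css=" ""), st.2) else st
  if item.2 = "xpath:position" then (st.1, some (PySem.Str.replace item.1 "xpath=" "")) else st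

-- the shared trailing fallback: 'if css is None and target: …' (identical code in A and B)
def pvFallback (css : Option String) (target : Option String) : Option String :=
  if css = none then
    match target with
    | none => css
    | some t =>
      if t ≠ "" then
        if PySem.Str.startswith t "name=" then some (PySem.Str.join "" ["[", t, "]"])
        else if PySem.Str.startswith t "id=" then some (PySem.Str.join "" ["[", t, "]"])
        else css
      else css
  else css

def getSeleniumCssAndXPath (targets : List (String × String)) (target : Option String) :
    Option String × Option String :=
  let p := targets.foldl pvStepA (none, none)
  (pvFallback p.1 target, p.2)

-- ===== PORT B =====
-- reverse scan: fill a slot only while it is still none, break when both are filled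
def pvLoopB (l : List (String × String)) (css xpath : Option String) :
    Option String × Option String :=
  match l with
  | [] => (css, xpath)
  | item :: rest =>
    let css := if css = none ∧ item.2 = "css:finder"
               then some (PySem.Str.replace item.1 "css=" "") else css
    let xpath := if xpath = none ∧ item.2 = "xpath:position"
                 then some (PySem.Str.replace item.1 "xpath=" "") else xpath
    if css ≠ none ∧ xpath ≠ none then (css, xpath) else pvLoopB rest css xpath

def getSeleniumCssAndXPath_alt (targets : List (String × String)) (target : Option String) :
    Option String × Option String :=
  let p := pvLoopB targets.reverse none none
  (pvFallback p.1 target, p.2)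

-- ===== PRECONDITION & SPEC =====
def Spec_getSeleniumCssAndXPath (targets : List (String × String)) (target : Option String) (out : Option String × Option String) : Prop := out = getSeleniumCssAndXPath_alt targets target
instance (targets : List (String × String)) (target : Option String) (out : Option String × Option String) : Decidable (Spec_getSeleniumCssAndXPath targets target out) := by unfold Spec_getSeleniumCssAndXPath; infer_instance

-- ===== CLAIM (what is proved, stated in full; the proofs are below) =====
def Claim_equal_getSeleniumCssAndXPath : Prop := ∀ (targets : List (String × String)) (target : Option String), Dom_getSeleniumCssAndXPath targets target → Spec_getSeleniumCssAndXPath targets target (getSeleniumCssAndXPath targets target)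

-- ===== LEMMAS AND PROOFS =====

-- first-match characterisations (proof-side only)
def pvFcCss (item : String × String) : Option String :=
  if item.2 = "css:finder" then some (PySem.Str.replace item.1 "css=" "") else none

def pvFcXp (item : String × String) : Option String :=
  if item.2 = "xpath:position" then some (PySem.Str.replace item.1 "xpath=" "") else none

def pvOor (a b : Option String) : Option String := match a with | some v => some v | none => b

def pvFirst (f : String × String → Option String) : List (String × String) → Option String
  | [] => none
  | i :: t => pvOor (f i) (pvFirst f t)

theorem pvOor_assoc (a b c : Option String) : pvOor (pvOor a b) c = pvOor a (pvOor b c) := by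
  cases a <;> simp [pvOor]

theorem pvOor_none_right (a : Option String) : pvOor a none = a := by cases a <;> simp [pvOor]

theorem pvFirst_append (f : String × String → Option String) (u v : List (String × String)) :
    pvFirst f (u ++ v) = pvOor (pvFirst f u) (pvFirst f v) := by
  induction u with
  | nil => simp [pvFirst, pvOor]
  | cons i t ih => simp [pvFirst, ih, pvOor_assoc]

-- A's loop: last match wins = first match of the reverse, else the initial value
theorem pvFoldA (l : List (String × String)) (c x : Option String) :
    l.foldl pvStepA (c, x) =
      (pvOor (pvFirst pvFcCss l.reverse) c, pvOor (pvFirst pvFcXp l.reverse) x) := by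
  induction l generalizing c x with
  | nil => simp [pvFirst, pvOor]
  | cons i t ih =>
    have hstep : pvStepA (c, x) i = (pvOor (pvFcCss i) c, pvOor (pvFcXp i) x) := by
      simp only [pvStepA, pvFcCss, pvFcXp]
      by_cases h1 : i.2 = "css:finder" <;> by_cases h2 : i.2 = "xpath:position" <;>
        simp [h1, h2, pvOor]
    simp only [List.foldl_cons, hstep, ih, List.reverse_cons, pvFirst_append, pvFirst,
      pvOor_none_right, pvOor_assoc]

-- B's loop keeps an already-filled slot, so it computes 'initial value, else first match'
theorem pvLoopB_eq (l : List (String × String)) (c x : Option String) :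
    pvLoopB l c x = (pvOor c (pvFirst pvFcCss l), pvOor x (pvFirst pvFcXp l)) := by
  induction l generalizing c x with
  | nil =>
    simp only [pvLoopB, pvFirst]
    exact Prod.ext_iff.mpr ⟨(pvOor_none_right c).symm, (pvOor_none_right x).symm⟩
  | cons i t ih =>
    simp only [pvLoopB]
    have hc : (if c = none ∧ i.2 = "css:finder"
        then some (PySem.Str.replace i.1 "css=" "") else c) = pvOor c (pvFcCss i) := by
      cases c <;> by_cases h : i.2 = "css:finder" <;> simp [h, pvOor, pvFcCss]
    have hx : (if x = none ∧ i.2 = "xpath:position"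
        then some (PySem.Str.replace i.1 "xpath=" "") else x) = pvOor x (pvFcXp i) := by
      cases x <;> by_cases h : i.2 = "xpath:position" <;> simp [h, pvOor, pvFcXp]
    rw [hc, hx, ih]
    by_cases hb : pvOor c (pvFcCss i) ≠ none ∧ pvOor x (pvFcXp i) ≠ none
    · rcases hb with ⟨h1, h2⟩
      rw [if_pos (And.intro h1 h2)]
      simp only [pvFirst]
      rw [← pvOor_assoc, ← pvOor_assoc]
      cases hcv : pvOor c (pvFcCss i) with
      | none => exact absurd hcv h1
      | some v =>
        cases hxv : pvOor x (pvFcXp i) with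
        | none => exact absurd hxv h2
        | some w => simp [pvOor]
    · simp only [if_neg hb, pvFirst, pvOor_assoc]

theorem pvLoops_agree (l : List (String × String)) :
    l.foldl pvStepA (none, none) = pvLoopB l.reverse none none := by
  rw [pvFoldA, pvLoopB_eq]
  exact Prod.ext_iff.mpr ⟨pvOor_none_right _, pvOor_none_right _⟩

-- ===== VERDICT (by name: the statement is the Claim_ definition above) =====
theorem getSeleniumCssAndXPath_spec : Claim_equal_getSeleniumCssAndXPath := by
  intro targets target _
  unfold Spec_getSeleniumCssAndXPath getSeleniumCssAndXPath getSeleniumCssAndXPath_alt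
  rw [pvLoops_agree]
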